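-- pv_equiv track=rewrite | github.com/ArastunM/Covid-Alarm | side_funcs.py | track_string
-- ===== SOURCE A (Python) =====
-- def track_string(string: str, start: str, end: str, from_end: bool, skip=0) -> str:
--     """Tracking parts of the given string with different configurations"""
--     recorded = ''
--     read = False
--     if from_end:  # if tracking should be in reversed order
--         string = string[::-1]
--
--     for letters in string:
--         if letters == end and read:
--             break
--         if read:
--             recorded += letters
--         if letters == start:
--             if skip > 0:  # applying skips
--                 skip -= 1
--             else:
--                 read = True
--
--     if from_end:  # reversing string back
--         recorded = recorded[::-1]
--     return recorded
-- ===== SOURCE B (Python) =====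
-- def track_string(string: str, start: str, end: str, from_end: bool, skip=0) -> str:
--     """Index-and-slice re-implementation: find the (skip+1)-th occurrence of
--     start, cut at the next occurrence of end (or the end of the string)."""
--     s = string[::-1] if from_end else string
--     occ = [p for p, c in enumerate(s) if c == start]
--     k = max(skip, 0)
--     if k >= len(occ):
--         return ''
--     tail = s[occ[k] + 1:]
--     j = next((p for p, c in enumerate(tail) if c == end), len(tail))
--     out = tail[:j]
--     return out[::-1] if from_end else out
-- ===== Notes on version B (the rewrite author's own statement) =====
-- stated objective: idiomatic
-- what changed: Replaces A's per-character read-flag/accumulator state machine with direct index computation: collect the occurrence indices of start via enumerate, pick the (max(skip,0)+1)-th one, and slice up to the next occurrence of end.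
import Mathlib
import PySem

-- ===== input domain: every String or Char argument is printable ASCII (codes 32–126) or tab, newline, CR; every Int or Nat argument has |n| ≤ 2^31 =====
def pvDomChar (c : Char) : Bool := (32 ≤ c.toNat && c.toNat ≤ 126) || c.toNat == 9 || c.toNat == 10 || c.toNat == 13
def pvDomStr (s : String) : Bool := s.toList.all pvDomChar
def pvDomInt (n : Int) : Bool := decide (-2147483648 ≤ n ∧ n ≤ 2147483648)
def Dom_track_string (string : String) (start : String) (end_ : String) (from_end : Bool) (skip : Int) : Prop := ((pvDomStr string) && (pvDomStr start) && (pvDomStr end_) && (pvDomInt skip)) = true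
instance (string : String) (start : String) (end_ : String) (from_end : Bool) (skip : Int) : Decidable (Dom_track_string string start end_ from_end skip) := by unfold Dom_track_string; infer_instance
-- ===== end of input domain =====

-- B replaces A's per-character flag/accumulator loop by direct index searches and slicing; objective: idiomatic.

-- ===== PORT A =====
-- the for-loop of A: state (read, skip, recorded); an element equal to `end` while reading breaks (returns recorded)
def aLoop (start end_ : String) : List Char → Bool → Int → List Char → List Char
  | [], _, _, recorded => recorded
  | c :: rest, read, skip, recorded =>
    if (String.singleton c = end_) ∧ read = true then recorded
    else
      let recorded' := if read then recorded ++ [c] else recorded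
      if String.singleton c = start then
        if skip > 0 then aLoop start end_ rest read (skip - 1) recorded'
        else aLoop start end_ rest true skip recorded'
      else aLoop start end_ rest read skip recorded'

def track_string (string : String) (start : String) (end_ : String) (from_end : Bool) (skip : Int) : String :=
  let l := if from_end then string.toList.reverse else string.toList   -- string[::-1] when from_end
  let recorded := aLoop start end_ l false skip []
  if from_end then String.ofList recorded.reverse else String.ofList recorded  -- recorded[::-1] when from_end

-- ===== PORT B =====
-- [p for p, c in enumerate(s) if c == start]
def occF (start : String) (s : Int) (l : List Char) : List Int :=
  ((PySem.List.enumerate l s).filter (fun pc => decide (String.singleton pc.2 = start))).map Prod.fst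

-- the body of B after the optional reversal; the `return ''` branch yields [] (its reversal is again '')
def bCore (start end_ : String) (l : List Char) (skip : Int) : List Char :=
  let occ := occF start 0 l
  let k := max skip 0
  if k ≥ (occ.length : Int) then []
  else
    -- tail = s[occ[k] + 1:]  (occ[k] is in range here)
    let tail := PySem.List.slice l (some (occ.getD k.toNat 0 + 1)) none
    -- j = next((p for p, c in enumerate(tail) if c == end), len(tail))
    let j := ((PySem.List.enumerate tail 0).find? (fun pc => decide (String.singleton pc.2 = end_))).elim ((tail.length : Int)) Prod.fst
    PySem.List.slice tail none (some j)   -- tail[:j]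

def track_string_alt (string : String) (start : String) (end_ : String) (from_end : Bool) (skip : Int) : String :=
  let l := if from_end then string.toList.reverse else string.toList
  let out := bCore start end_ l skip
  if from_end then String.ofList out.reverse else String.ofList out

-- ===== PRECONDITION & SPEC =====
def Spec_track_string (string : String) (start : String) (end_ : String) (from_end : Bool) (skip : Int) (out : String) : Prop := out = track_string_alt string start end_ from_end skip
instance (string : String) (start : String) (end_ : String) (from_end : Bool) (skip : Int) (out : String) : Decidable (Spec_track_string string start end_ from_end skip out) := by unfold Spec_track_string; infer_instance

-- ===== CLAIM (what is proved, stated in full; the proofs are below) =====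
def Claim_equal_track_string : Prop := ∀ (string : String) (start : String) (end_ : String) (from_end : Bool) (skip : Int), Dom_track_string string start end_ from_end skip → Spec_track_string string start end_ from_end skip (track_string string start end_ from_end skip)

-- ===== LEMMAS AND PROOFS =====

-- once `read` is set, A records exactly up to the first occurrence of `end`
theorem aLoop_read (start end_ : String) :
    ∀ (l : List Char) (sk : Int) (rec : List Char),
      aLoop start end_ l true sk rec = rec ++ l.takeWhile (fun c => !decide (String.singleton c = end_)) := by
  intro l
  induction l with
  | nil => intro sk rec; simp [aLoop]
  | cons c rest ih =>
    intro sk rec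
    by_cases he : String.singleton c = end_
    · simp [aLoop, he]
    · simp [aLoop, he, ih]

theorem occF_shift (start : String) :
    ∀ (l : List Char) (s : Int), occF start s l = (occF start 0 l).map (· + s) := by
  intro l
  induction l with
  | nil => intro s; simp [occF, PySem.List.enumerate_nil]
  | cons c rest ih =>
    intro s
    have ihs := ih (s + 1)
    have ih1 := ih (1 : Int)
    simp only [occF] at ihs ih1 ⊢
    rw [PySem.List.enumerate_cons, PySem.List.enumerate_cons]
    by_cases hs : String.singleton c = start <;>
      simp only [List.filter_cons, hs, decide_true, decide_false,
        Bool.false_eq_true, if_true, if_false, List.map_cons,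
        show (0 : Int) + 1 = 1 by norm_num] <;>
      rw [ihs, ih1] <;>
      simp only [List.map_map, zero_add] <;>
      [(refine List.cons_eq_cons.mpr ⟨rfl, ?_⟩); skip] <;>
      (apply List.map_congr_left; intro x _; simp; omega)

theorem occF_cons (start : String) (c : Char) (l : List Char) :
    occF start 0 (c :: l) =
      (if String.singleton c = start then [(0 : Int)] else []) ++ (occF start 0 l).map (· + 1) := by
  have h1 := occF_shift start l 1
  by_cases hs : String.singleton c = start <;>
    simp only [occF, PySem.List.enumerate_cons, List.filter_cons, hs, decide_true, decide_false,
      Bool.false_eq_true, if_true, if_false, List.map_cons,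
      show (0 : Int) + 1 = 1 by norm_num] <;>
    simp only [occF] at h1 <;>
    simp [h1]

theorem occF_nonneg (start : String) (l : List Char) :
    ∀ x ∈ occF start 0 l, 0 ≤ x := by
  intro x hx
  simp only [occF, List.mem_map, List.mem_filter] at hx
  obtain ⟨pc, ⟨hmem, _⟩, rfl⟩ := hx
  rw [PySem.List.mem_enumerate_iff] at hmem
  obtain ⟨k, hk, rfl⟩ := hmem
  simp

-- the `next(...)` index is the length of the prefix before the first `end`
theorem find_enum (end_ : String) :
    ∀ (t : List Char) (s : Int),
      ((PySem.List.enumerate t s).find? (fun pc => decide (String.singleton pc.2 = end_))).elim ((t.length : Int) + s) Prod.fst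
        = s + ((t.takeWhile (fun c => !decide (String.singleton c = end_))).length : Int) := by
  intro t
  induction t with
  | nil => intro s; simp [PySem.List.enumerate_nil]
  | cons c rest ih =>
    intro s
    by_cases he : String.singleton c = end_
    · simp [PySem.List.enumerate_cons, List.find?_cons, he, List.takeWhile_cons]
    · simp only [PySem.List.enumerate_cons, List.find?_cons, he, decide_false, Bool.false_eq_true,
        if_false, List.takeWhile_cons, List.length_cons]
      have h2 := ih (s + 1)
      have hd : (((rest.length + 1 : Nat) : Int) + s) = (rest.length : Int) + (s + 1) := by push_cast; ring
      rw [hd, h2]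
      simp only [Bool.not_false, if_true, List.length_cons]
      push_cast
      ring

theorem take_len_takeWhile {α : Type} (p : α → Bool) (t : List α) :
    t.take (t.takeWhile p).length = t.takeWhile p := by
  induction t with
  | nil => simp
  | cons c rest ih =>
    by_cases h : p c <;> simp [List.takeWhile_cons, h, List.take_succ_cons, ih]

-- B's tail-cut in closed form
theorem bTail (end_ : String) (tail : List Char) :
    PySem.List.slice tail none
        (some (((PySem.List.enumerate tail 0).find? (fun pc => decide (String.singleton pc.2 = end_))).elim ((tail.length : Int)) Prod.fst))
      = tail.takeWhile (fun c => !decide (String.singleton c = end_)) := by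
  have h := find_enum end_ tail 0
  simp only [add_zero, zero_add] at h
  rw [h, PySem.List.slice_to_natCast, take_len_takeWhile]

theorem bCore_nil (start end_ : String) (skip : Int) : bCore start end_ [] skip = [] := by
  simp only [bCore, occF, PySem.List.enumerate_nil, List.filter_nil, List.map_nil, List.length_nil]
  rw [if_pos (by omega)]

-- the three cons-step equations of bCore, matching A's loop branches
theorem bCore_cons_start_skip (start end_ : String) (c : Char) (l : List Char) (skip : Int)
    (hs : String.singleton c = start) (hk : skip > 0) :
    bCore start end_ (c :: l) skip = bCore start end_ l (skip - 1) := by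
  have hocc := occF_cons start c l
  rw [if_pos hs, List.singleton_append] at hocc
  simp only [bCore, hocc, List.length_cons, List.length_map]
  by_cases hlen : max (skip - 1) 0 ≥ ((occF start 0 l).length : Int)
  · rw [if_pos (by push_cast; omega), if_pos hlen]
  · rw [if_neg (by push_cast; omega), if_neg hlen]
    have hlt' : (max (skip - 1) 0).toNat < (occF start 0 l).length := by omega
    have hidx : ((0 : Int) :: (occF start 0 l).map (· + 1)).getD (max skip 0).toNat 0
        = (occF start 0 l).getD (max (skip - 1) 0).toNat 0 + 1 := by
      have h1 : (max skip 0).toNat = (max (skip - 1) 0).toNat + 1 := by omega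
      rw [h1, List.getD_cons_succ,
        List.getD_eq_getElem _ _ (by simpa using hlt'), List.getD_eq_getElem _ _ hlt',
        List.getElem_map]
    rw [hidx]
    have hnn : 0 ≤ (occF start 0 l).getD (max (skip - 1) 0).toNat 0 := by
      rw [List.getD_eq_getElem _ _ hlt']
      exact occF_nonneg start l _ (List.getElem_mem hlt')
    rw [PySem.List.slice_from _ (by omega), PySem.List.slice_from _ (by omega)]
    have hstep : ((occF start 0 l).getD (max (skip - 1) 0).toNat 0 + 1 + 1).toNat
         = ((occF start 0 l).getD (max (skip - 1) 0).toNat 0 + 1).toNat + 1 := by omega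
    rw [hstep, List.drop_succ_cons]

theorem bCore_cons_start_go (start end_ : String) (c : Char) (l : List Char) (skip : Int)
    (hs : String.singleton c = start) (hk : ¬ skip > 0) :
    bCore start end_ (c :: l) skip = l.takeWhile (fun c => !decide (String.singleton c = end_)) := by
  have hocc := occF_cons start c l
  rw [if_pos hs, List.singleton_append] at hocc
  simp only [bCore, hocc, List.length_cons, List.length_map]
  rw [if_neg (by push_cast; omega)]
  have hmax : (max skip 0).toNat = 0 := by omega
  rw [hmax, List.getD_cons_zero]
  rw [show ((0 : Int) + 1) = ((1 : Nat) : Int) by norm_num, PySem.List.slice_from_natCast]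
  simp only [List.drop_one, List.tail_cons]
  exact bTail end_ l

theorem bCore_cons_other (start end_ : String) (c : Char) (l : List Char) (skip : Int)
    (hs : ¬ String.singleton c = start) :
    bCore start end_ (c :: l) skip = bCore start end_ l skip := by
  have hocc := occF_cons start c l
  rw [if_neg hs, List.nil_append] at hocc
  simp only [bCore, hocc, List.length_map]
  by_cases hlen : max skip 0 ≥ ((occF start 0 l).length : Int)
  · rw [if_pos hlen, if_pos hlen]
  · rw [if_neg hlen, if_neg hlen]
    have hlt : (max skip 0).toNat < (occF start 0 l).length := by omega
    have hidx : ((occF start 0 l).map (· + 1)).getD (max skip 0).toNat 0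
        = (occF start 0 l).getD (max skip 0).toNat 0 + 1 := by
      rw [List.getD_eq_getElem _ _ (by simpa using hlt), List.getD_eq_getElem _ _ hlt,
        List.getElem_map]
    rw [hidx]
    have hnn : 0 ≤ (occF start 0 l).getD (max skip 0).toNat 0 := by
      rw [List.getD_eq_getElem _ _ hlt]
      exact occF_nonneg start l _ (List.getElem_mem hlt)
    rw [PySem.List.slice_from _ (by omega), PySem.List.slice_from _ (by omega)]
    have hstep : ((occF start 0 l).getD (max skip 0).toNat 0 + 1 + 1).toNat
         = ((occF start 0 l).getD (max skip 0).toNat 0 + 1).toNat + 1 := by omega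
    rw [hstep, List.drop_succ_cons]

theorem aLoop_eq_bCore (start end_ : String) :
    ∀ (l : List Char) (skip : Int) (rec : List Char),
      aLoop start end_ l false skip rec = rec ++ bCore start end_ l skip := by
  intro l
  induction l with
  | nil => intro skip rec; simp [aLoop, bCore_nil]
  | cons c rest ih =>
    intro skip rec
    by_cases hs : String.singleton c = start
    · by_cases hk : skip > 0
      · have h1 : aLoop start end_ (c :: rest) false skip rec
            = aLoop start end_ rest false (skip - 1) rec := by
          simp [aLoop, hs, hk]
        rw [h1, ih, bCore_cons_start_skip start end_ c rest skip hs hk]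
      · have h1 : aLoop start end_ (c :: rest) false skip rec
            = aLoop start end_ rest true skip rec := by
          simp [aLoop, hs, hk]
        rw [h1, aLoop_read, bCore_cons_start_go start end_ c rest skip hs hk]
    · have h1 : aLoop start end_ (c :: rest) false skip rec
          = aLoop start end_ rest false skip rec := by
        simp [aLoop, hs]
      rw [h1, ih, bCore_cons_other start end_ c rest skip hs]

-- ===== VERDICT (by name: the statement is the Claim_ definition above) =====
theorem track_string_spec : Claim_equal_track_string := by
  intro string start end_ from_end skip _
  unfold Spec_track_string
  by_cases hf : from_end = true <;>
    simp [track_string, track_string_alt, hf, aLoop_eq_bCore]
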